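-- pv_equiv track=rewrite | github.com/sueszli/vector-database-benchmark | dataset/python-mutated/seqs.py | butlast
-- ===== SOURCE A (Python) =====
-- def butlast(seq):
--     if False:
--         while True:
--             i = 10
--     'Iterates over all elements of the sequence but last.'
--     it = iter(seq)
--     try:
--         prev = next(it)
--     except StopIteration:
--         pass
--     else:
--         for item in it:
--             yield prev
--             prev = item
-- ===== SOURCE B (Python) =====
-- import itertools
--
-- def butlast(seq):
--     it1, it2 = itertools.tee(seq)
--     next(it2, None)
--     for a, _ in zip(it1, it2):
--         yield a
-- ===== Notes on version B (the rewrite author's own statement) =====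
-- stated objective: idiomatic
-- what changed: Replaces the manual one-element delay buffer (prev variable updated in a loop) with two offset tee iterators zipped together, yielding each element paired with its successor.
import Mathlib
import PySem

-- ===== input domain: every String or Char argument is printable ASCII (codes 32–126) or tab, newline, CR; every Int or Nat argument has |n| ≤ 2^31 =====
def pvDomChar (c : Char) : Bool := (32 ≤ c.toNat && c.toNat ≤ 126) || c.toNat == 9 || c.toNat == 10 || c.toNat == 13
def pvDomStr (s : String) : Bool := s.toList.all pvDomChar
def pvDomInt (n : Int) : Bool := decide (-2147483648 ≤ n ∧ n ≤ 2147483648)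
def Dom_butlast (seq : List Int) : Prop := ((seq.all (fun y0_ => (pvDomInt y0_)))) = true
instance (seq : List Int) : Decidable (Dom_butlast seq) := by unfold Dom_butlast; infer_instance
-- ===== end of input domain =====

-- B replaces A's manual one-element delay buffer with two offset iterators zipped together (idiomatic; same cost).

-- ===== PORT A =====
-- A's loop: keep `prev`, yield it when the next item exists, then shift.
def butlastLoop (prev : Int) : List Int → List Int
  | [] => []
  | item :: it => prev :: butlastLoop item it

def butlast (seq : List Int) : List Int :=
  match seq with
  | [] => []              -- next(it) raised StopIteration: yield nothing
  | prev :: it => butlastLoop prev it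

-- ===== PORT B =====
-- tee + advance second iterator by one = zip seq with seq.drop 1; yield the first component.
def butlast_alt (seq : List Int) : List Int :=
  (seq.zip (seq.drop 1)).map Prod.fst

-- ===== PRECONDITION & SPEC =====
def Spec_butlast (seq : List Int) (out : List Int) : Prop := out = butlast_alt seq
instance (seq : List Int) (out : List Int) : Decidable (Spec_butlast seq out) := by unfold Spec_butlast; infer_instance

-- ===== CLAIM (what is proved, stated in full; the proofs are below) =====
def Claim_equal_butlast : Prop := ∀ (seq : List Int), Dom_butlast seq → Spec_butlast seq (butlast seq)

-- ===== LEMMAS AND PROOFS =====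
theorem butlastLoop_eq (prev : Int) (it : List Int) :
    butlastLoop prev it = ((prev :: it).zip it).map Prod.fst := by
  induction it generalizing prev with
  | nil => simp [butlastLoop]
  | cons item rest ih => simp [butlastLoop, ih item]

-- ===== VERDICT (by name: the statement is the Claim_ definition above) =====
theorem butlast_spec : Claim_equal_butlast := by
  intro seq _
  unfold Spec_butlast butlast butlast_alt
  cases seq with
  | nil => rfl
  | cons prev it => simpa using butlastLoop_eq prev it
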